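-- pv_equiv track=rewrite | github.com/jianlin-cheng/DeepComplex | libs/scripts/farhan_homodimer_scripts/mapfasta2pdb.py | alignFastas
-- ===== SOURCE A (Python) =====
-- def alignFastas(fasta,fasta_pdb,pdb_dict):
--     s=fasta_pdb
--     l=len(fasta)
--     i=0
--     max_val=max(pdb_dict.keys())
--     #string=""
--     if (l>len(s)):
--         while (i<l):
--             if (s[i]=="-" or s[i]==fasta[i]):
--                 i+=1
--                 continue
--             if (s[i]!=fasta[i]):
--                 #string=s[:i-1]+"-"+s[i:] #insert a gap at the beginning
--                 s="-"+s #insert a gap at the beginning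
--                 i=0
--
--
--
--     return s
-- ===== SOURCE B (Python) =====
-- def alignFastas(fasta, fasta_pdb, pdb_dict):
--     # Same return value as A inside Pre_; pdb_dict is unused (A only max()s its keys).
--     s0 = fasta_pdb
--     l = len(fasta)
--     if l <= len(s0):
--         return s0
--
--     def fits(g):
--         # offset g is acceptable: every character of the original pdb string that
--         # lands inside the fasta is a gap or agrees with the fasta
--         return all(c == '-' or c == fasta[g + j]
--                    for j, c in enumerate(s0) if g + j < l)
--
--     g = 0
--     while not fits(g):
--         g += 1
--     return "-" * g + s0
-- ===== Notes on version B (the rewrite author's own statement) =====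
-- stated objective: alternative
-- what changed: A simulates prepending gaps one at a time, rescanning the whole grown string (including its gap prefix) from position 0 after every mismatch; B never mutates the string and instead tests each candidate offset g directly against the original pdb string only, returning '-'*g + s at the first acceptable offset.
import Mathlib
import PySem

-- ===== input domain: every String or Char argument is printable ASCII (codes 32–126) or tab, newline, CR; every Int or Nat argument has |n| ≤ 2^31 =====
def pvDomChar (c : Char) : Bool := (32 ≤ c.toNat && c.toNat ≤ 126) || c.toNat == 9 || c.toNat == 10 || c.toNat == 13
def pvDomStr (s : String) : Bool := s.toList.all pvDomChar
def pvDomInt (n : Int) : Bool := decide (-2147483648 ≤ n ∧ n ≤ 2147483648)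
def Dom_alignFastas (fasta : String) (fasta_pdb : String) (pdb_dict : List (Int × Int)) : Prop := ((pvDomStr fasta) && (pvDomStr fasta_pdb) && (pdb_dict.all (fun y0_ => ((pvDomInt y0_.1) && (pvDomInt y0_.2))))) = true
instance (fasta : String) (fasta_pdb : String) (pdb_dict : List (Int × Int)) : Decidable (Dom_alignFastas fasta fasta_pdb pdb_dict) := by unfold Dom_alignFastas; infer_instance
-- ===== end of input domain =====

-- B replaces A's prepend-one-gap-and-rescan-from-0 simulation by a direct search for the
-- smallest acceptable offset, each offset tested against the original pdb string only
-- (alternative algorithm; no string is rebuilt while searching).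


-- ===== PORT A =====
-- number of leading '-' characters (termination measure only; not part of A's logic)
def pvLeadGaps (s : List Char) : Nat := (s.takeWhile (fun c => c == '-')).length

theorem pvLeadGaps_cons (s : List Char) : pvLeadGaps ('-' :: s) = pvLeadGaps s + 1 := by
  simp [pvLeadGaps, List.takeWhile]

theorem pvLeadGaps_le {s : List Char} {i : Nat} {c : Char} (h : s[i]? = some c)
    (hc : ¬ c = '-') : pvLeadGaps s ≤ i := by
  induction s generalizing i with
  | nil => simp at h
  | cons a t ih =>
    cases i with
    | zero =>
      simp at h
      subst h
      simp [pvLeadGaps, List.takeWhile_cons, hc]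
    | succ n =>
      simp at h
      by_cases ha : a = '-'
      · have := ih h
        subst ha
        rw [pvLeadGaps_cons]
        omega
      · simp [pvLeadGaps, List.takeWhile_cons, ha]

-- A's while-loop: state (s, i); s[i] out of range is Python's IndexError → none
def alignALoop (fasta : List Char) (s : List Char) (i : Nat) : Option (List Char) :=
  if hi : i < fasta.length then
    match h : s[i]? with
    | none => none                                   -- IndexError (excluded by Pre_)
    | some c =>
      if c = '-' ∨ fasta[i]? = some c then alignALoop fasta s (i + 1)
      else alignALoop fasta ('-' :: s) 0
  else some s
termination_by (fasta.length - pvLeadGaps s, fasta.length - i)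
decreasing_by
  · apply Prod.Lex.right
    omega
  · apply Prod.Lex.left
    rename_i hcond
    have hc : ¬ c = '-' := fun hcEq => hcond (Or.inl hcEq)
    have hle := pvLeadGaps_le h hc
    rw [pvLeadGaps_cons]
    omega

def alignFastas (fasta : String) (fasta_pdb : String) (pdb_dict : List (Int × Int)) : String :=
  match PySem.List.max? (pdb_dict.map Prod.fst) (fun x => x) with
  | none => ""                                       -- max() of empty keys: ValueError (excluded by Pre_)
  | some _ =>
    if fasta_pdb.toList.length < fasta.toList.length then
      match alignALoop fasta.toList fasta_pdb.toList 0 with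
      | some r => String.ofList r
      | none => ""                                   -- IndexError (excluded by Pre_)
    else fasta_pdb

-- ===== PORT B =====
-- Source B's fits(g): every char of s0 landing inside the fasta is '-' or agrees
def pvFits (f s0 : List Char) (g : Nat) : Bool :=
  (PySem.List.enumerate s0).all (fun jc =>
    if (g : Int) + jc.1 < (f.length : Int) then
      jc.2 == '-' || PySem.List.pyGet? f ((g : Int) + jc.1) == some jc.2
    else true)

-- Source B's 'while not fits(g): g += 1', structural on a sufficient step count
-- (after f.length + 1 - g steps the offset is ≥ f.length and fits always holds)
def alignBLoopGo (f s0 : List Char) : Nat → Nat → Nat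
  | 0, g => g
  | n + 1, g => if pvFits f s0 g then g else alignBLoopGo f s0 n (g + 1)

def alignBLoop (f s0 : List Char) (g : Nat) : Nat :=
  alignBLoopGo f s0 (f.length + 1 - g) g

def alignFastas_alt (fasta : String) (fasta_pdb : String) (pdb_dict : List (Int × Int)) : String :=
  if fasta.toList.length ≤ fasta_pdb.toList.length then fasta_pdb
  else String.ofList
    (List.replicate (alignBLoop fasta.toList fasta_pdb.toList 0) '-' ++ fasta_pdb.toList)

-- ===== PRECONDITION & SPEC =====
-- offset g is acceptable: every char of s0 landing inside f is a gap or agrees with f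
abbrev pvOk (f s0 : List Char) (g : Nat) : Prop :=
  ∀ j, j < s0.length → g + j < f.length → (s0[j]? = some '-' ∨ s0[j]? = f[g + j]?)

-- Pre_ excludes exactly the inputs where A raises: an empty pdb_dict (ValueError from
-- max() of no keys), and inputs where some offset g with g + len(fasta_pdb) < len(fasta)
-- is already acceptable (A's scan then walks past the end of the string: IndexError).
def Pre_alignFastas (fasta : String) (fasta_pdb : String) (pdb_dict : List (Int × Int)) : Prop :=
  pdb_dict ≠ [] ∧
  (fasta.toList.length ≤ fasta_pdb.toList.length ∨
   ∀ g, g < fasta.toList.length - fasta_pdb.toList.length →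
     ¬ pvOk fasta.toList fasta_pdb.toList g)
instance (fasta : String) (fasta_pdb : String) (pdb_dict : List (Int × Int)) : Decidable (Pre_alignFastas fasta fasta_pdb pdb_dict) := by unfold Pre_alignFastas; infer_instance

def pvWitness_alignFastas : String × String × (List (Int × Int)) := ("ACD", "A-D", [(1, 7)])

def Spec_alignFastas (fasta : String) (fasta_pdb : String) (pdb_dict : List (Int × Int)) (out : String) : Prop := out = alignFastas_alt fasta fasta_pdb pdb_dict
instance (fasta : String) (fasta_pdb : String) (pdb_dict : List (Int × Int)) (out : String) : Decidable (Spec_alignFastas fasta fasta_pdb pdb_dict out) := by unfold Spec_alignFastas; infer_instance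

-- ===== CLAIM (what is proved, stated in full; the proofs are below) =====
def Claim_equal_alignFastas : Prop := ∀ (fasta : String) (fasta_pdb : String) (pdb_dict : List (Int × Int)), Dom_alignFastas fasta fasta_pdb pdb_dict → Pre_alignFastas fasta fasta_pdb pdb_dict → Spec_alignFastas fasta fasta_pdb pdb_dict (alignFastas fasta fasta_pdb pdb_dict)

-- ===== LEMMAS AND PROOFS =====

theorem pvFits_of_ge (f s0 : List Char) (g : Nat) (h : f.length ≤ g) :
    pvFits f s0 g = true := by
  unfold pvFits
  rw [List.all_eq_true]
  intro jc hjc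
  obtain ⟨k, hk, rfl⟩ := (PySem.List.mem_enumerate_iff _ _ _).mp hjc
  have hlt : ¬ ((g : Int) + ((0 : Int) + (k : Int)) < (f.length : Int)) := by
    push_cast; omega
  simp only [hlt, if_false]

theorem pvFits_iff (f s0 : List Char) (g : Nat) : pvFits f s0 g = true ↔ pvOk f s0 g := by
  unfold pvFits
  rw [List.all_eq_true]
  constructor
  · intro h j hj hgj
    have hmem : ((0 : Int) + (j : Int), s0[j]) ∈ PySem.List.enumerate s0 0 :=
      (PySem.List.mem_enumerate_iff _ _ _).mpr ⟨j, hj, rfl⟩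
    have hh := h _ hmem
    have hcast : (g : Int) + ((0 : Int) + (j : Int)) = ((g + j : Nat) : Int) := by push_cast; ring
    have hclt : ((g + j : Nat) : Int) < (f.length : Int) := by push_cast; omega
    rw [hcast, PySem.List.pyGet?_natCast, if_pos hclt] at hh
    simp only [] at hh
    rw [List.getElem?_eq_getElem hj]
    rcases Bool.or_eq_true_iff.mp hh with hl | hr
    · left; rw [beq_iff_eq] at hl; rw [hl]
    · right; rw [beq_iff_eq] at hr; rw [hr]
  · intro hok jc hjc
    obtain ⟨k, hk, rfl⟩ := (PySem.List.mem_enumerate_iff _ _ _).mp hjc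
    have hcast : (g : Int) + ((0 : Int) + (k : Int)) = ((g + k : Nat) : Int) := by push_cast; ring
    rw [hcast, PySem.List.pyGet?_natCast]
    by_cases hlt : g + k < f.length
    · rw [if_pos (by push_cast; omega)]
      rcases hok k hk hlt with hl | hr
      · rw [List.getElem?_eq_getElem hk] at hl
        simp at hl
        simp [hl]
      · rw [List.getElem?_eq_getElem hk] at hr
        simp [← hr]
    · rw [if_neg (by push_cast; omega)]
  done

theorem rep_getElem? (g : Nat) (s0 : List Char) (i : Nat) :
    (List.replicate g '-' ++ s0)[i]? = if i < g then some '-' else s0[i - g]? := by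
  by_cases h : i < g
  · rw [if_pos h, List.getElem?_append_left (by simpa using h)]
    simp [h]
  · rw [if_neg h, List.getElem?_append_right (by simpa using Nat.le_of_not_lt h)]
    simp

theorem scan_ok (f s0 : List Char) (g : Nat) (hok : pvOk f s0 g)
    (hlen : f.length ≤ g + s0.length) :
    ∀ i, i ≤ f.length →
      alignALoop f (List.replicate g '-' ++ s0) i = some (List.replicate g '-' ++ s0) := by
  have main : ∀ n i, i ≤ f.length → f.length - i = n →
      alignALoop f (List.replicate g '-' ++ s0) i = some (List.replicate g '-' ++ s0) := by
    intro n
    induction n with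
    | zero =>
      intro i hi hn
      rw [alignALoop, dif_neg (by omega)]
    | succ n ih =>
      intro i hi hn
      have hil : i < f.length := by omega
      rw [alignALoop, dif_pos hil]
      split
      · rename_i heq
        rw [rep_getElem?] at heq
        split at heq
        · exact absurd heq (by simp)
        · rename_i hig
          rw [List.getElem?_eq_none_iff] at heq
          omega
      · rename_i c heq
        rw [rep_getElem?] at heq
        have hcond : c = '-' ∨ f[i]? = some c := by
          by_cases hig : i < g
          · rw [if_pos hig] at heq
            left; exact (Option.some.inj heq).symm
          · rw [if_neg hig] at heq
            have hjl : i - g < s0.length := by omega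
            have hgj : g + (i - g) < f.length := by omega
            rcases hok (i - g) hjl hgj with hl | hr
            · left
              rw [heq] at hl
              exact Option.some.inj hl
            · right
              rw [heq] at hr
              have : g + (i - g) = i := by omega
              rw [this] at hr
              exact hr.symm
        rw [if_pos hcond]
        exact ih (i + 1) (by omega) (by omega)
  intro i hi
  exact main (f.length - i) i hi rfl

theorem scan_short (f s0 : List Char) (g : Nat) (hok : pvOk f s0 g)
    (hlen : g + s0.length < f.length) :
    ∀ i, i ≤ g + s0.length → alignALoop f (List.replicate g '-' ++ s0) i = none := by
  have main : ∀ n i, i ≤ g + s0.length → g + s0.length - i = n →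
      alignALoop f (List.replicate g '-' ++ s0) i = none := by
    intro n
    induction n with
    | zero =>
      intro i hi hn
      have hieq : i = g + s0.length := by omega
      rw [alignALoop, dif_pos (by omega)]
      split
      · rfl
      · rename_i c heq
        rw [rep_getElem?, if_neg (by omega), List.getElem?_eq_none_iff.mpr (by omega)] at heq
        exact absurd heq (by simp)
    | succ n ih =>
      intro i hi hn
      have hil : i < f.length := by omega
      rw [alignALoop, dif_pos hil]
      split
      · rfl
      · rename_i c heq
        rw [rep_getElem?] at heq
        have hcond : c = '-' ∨ f[i]? = some c := by
          by_cases hig : i < g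
          · rw [if_pos hig] at heq
            left; exact (Option.some.inj heq).symm
          · rw [if_neg hig] at heq
            have hjl : i - g < s0.length := by omega
            have hgj : g + (i - g) < f.length := by omega
            rcases hok (i - g) hjl hgj with hl | hr
            · left
              rw [heq] at hl
              exact Option.some.inj hl
            · right
              rw [heq] at hr
              have : g + (i - g) = i := by omega
              rw [this] at hr
              exact hr.symm
        rw [if_pos hcond]
        exact ih (i + 1) (by omega) (by omega)
  intro i hi
  exact main (g + s0.length - i) i hi rfl

theorem scan_bad (f s0 : List Char) (g : Nat) (hbad : ¬ pvOk f s0 g) :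
    alignALoop f (List.replicate g '-' ++ s0) 0
      = alignALoop f (List.replicate (g + 1) '-' ++ s0) 0 := by
  have hex : ∃ j, j < s0.length ∧ g + j < f.length ∧
      ¬ (s0[j]? = some '-' ∨ s0[j]? = f[g + j]?) := by
    unfold pvOk at hbad
    push_neg at hbad
    obtain ⟨j, hj1, hj2, hj3, hj4⟩ := hbad
    exact ⟨j, hj1, hj2, by push_neg; exact ⟨hj3, hj4⟩⟩
  classical
  have hex2 : ∃ j0, j0 < s0.length ∧ g + j0 < f.length ∧
      ¬ (s0[j0]? = some '-' ∨ s0[j0]? = f[g + j0]?) ∧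
      ∀ m, m < j0 → m < s0.length → g + m < f.length →
        (s0[m]? = some '-' ∨ s0[m]? = f[g + m]?) := by
    refine ⟨Nat.find hex, (Nat.find_spec hex).1, (Nat.find_spec hex).2.1,
      (Nat.find_spec hex).2.2, ?_⟩
    intro m hm hml hmf
    have hnm := Nat.find_min hex hm
    push_neg at hnm
    exact hnm hml hmf
  obtain ⟨j0, hj0len, hj0lt, hj0bad, hmin⟩ := hex2
  obtain ⟨hj0gap, hj0ne⟩ := not_or.mp hj0bad
  have main : ∀ n i, i ≤ g + j0 → g + j0 - i = n →
      alignALoop f (List.replicate g '-' ++ s0) i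
        = alignALoop f (List.replicate (g + 1) '-' ++ s0) 0 := by
    intro n
    induction n with
    | zero =>
      intro i hi hn
      have hieq : i = g + j0 := by omega
      subst hieq
      rw [alignALoop, dif_pos hj0lt]
      split
      · rename_i heq
        rw [rep_getElem?, if_neg (by omega)] at heq
        have hred : g + j0 - g = j0 := by omega
        rw [hred, List.getElem?_eq_getElem hj0len] at heq
        exact absurd heq (by simp)
      · rename_i c heq
        rw [rep_getElem?, if_neg (by omega)] at heq
        have hred : g + j0 - g = j0 := by omega
        rw [hred] at heq
        rw [if_neg (by
          rintro (hc | hc)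
          · exact hj0gap (by rw [heq, hc])
          · exact hj0ne (by rw [heq, ← hc]))]
        rw [List.replicate_succ]
        rfl
    | succ n ih =>
      intro i hi hn
      have hil : i < f.length := by omega
      rw [alignALoop, dif_pos hil]
      split
      · rename_i heq
        rw [rep_getElem?] at heq
        by_cases hig : i < g
        · rw [if_pos hig] at heq
          exact absurd heq (by simp)
        · rw [if_neg hig, List.getElem?_eq_none_iff] at heq
          omega
      · rename_i c heq
        rw [rep_getElem?] at heq
        have hcond : c = '-' ∨ f[i]? = some c := by
          by_cases hig : i < g
          · rw [if_pos hig] at heq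
            left; exact (Option.some.inj heq).symm
          · rw [if_neg hig] at heq
            have hjlt : i - g < j0 := by omega
            have hjl : i - g < s0.length := by omega
            have hgj : g + (i - g) < f.length := by omega
            rcases hmin (i - g) hjlt hjl hgj with hl | hr
            · left
              rw [heq] at hl
              exact Option.some.inj hl
            · right
              rw [heq] at hr
              have hidx : g + (i - g) = i := by omega
              rw [hidx] at hr
              exact hr.symm
        rw [if_pos hcond]
        exact ih (i + 1) (by omega) (by omega)
  exact main (g + j0 - 0) 0 (by omega) rfl

theorem bLoopGo_fits (f s0 : List Char) :
    ∀ n g, f.length ≤ g + n → pvFits f s0 (alignBLoopGo f s0 n g) = true := by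
  intro n
  induction n with
  | zero =>
    intro g hg
    exact pvFits_of_ge f s0 g (by omega)
  | succ n ih =>
    intro g hg
    by_cases hfit : pvFits f s0 g
    · simpa [alignBLoopGo, hfit]
    · simp only [alignBLoopGo, hfit, if_false]
      exact ih (g + 1) (by omega)

theorem bLoop_fits (f s0 : List Char) (g : Nat) :
    pvFits f s0 (alignBLoop f s0 g) = true := by
  unfold alignBLoop
  exact bLoopGo_fits f s0 _ g (by omega)

theorem bLoop_fix (f s0 : List Char) (g : Nat) (hf : pvFits f s0 g = true) :
    alignBLoop f s0 g = g := by
  unfold alignBLoop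
  cases h : f.length + 1 - g with
  | zero => rfl
  | succ n => simp [alignBLoopGo, hf]

theorem bLoop_step (f s0 : List Char) (g : Nat) (hnf : ¬ pvFits f s0 g = true) :
    alignBLoop f s0 g = alignBLoop f s0 (g + 1) := by
  have hgl : g < f.length := by
    by_contra hge
    exact hnf (pvFits_of_ge f s0 g (by omega))
  unfold alignBLoop
  have h1 : f.length + 1 - g = (f.length + 1 - (g + 1)) + 1 := by omega
  rw [h1]
  simp [alignBLoopGo, hnf]

theorem loop_eq (f s0 : List Char) : ∀ g,
    alignALoop f (List.replicate g '-' ++ s0) 0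
      = (if f.length ≤ alignBLoop f s0 g + s0.length
         then some (List.replicate (alignBLoop f s0 g) '-' ++ s0) else none) := by
  have main : ∀ n g, f.length - g ≤ n →
      alignALoop f (List.replicate g '-' ++ s0) 0
        = (if f.length ≤ alignBLoop f s0 g + s0.length
           then some (List.replicate (alignBLoop f s0 g) '-' ++ s0) else none) := by
    intro n
    induction n with
    | zero =>
      intro g hg
      have hfit : pvFits f s0 g = true := pvFits_of_ge f s0 g (by omega)
      rw [bLoop_fix f s0 g hfit]
      have hok := (pvFits_iff f s0 g).mp hfit
      by_cases hlen : f.length ≤ g + s0.length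
      · rw [if_pos hlen]
        exact scan_ok f s0 g hok hlen 0 (by omega)
      · rw [if_neg hlen]
        exact scan_short f s0 g hok (by omega) 0 (by omega)
    | succ n ih =>
      intro g hg
      by_cases hfit : pvFits f s0 g
      · rw [bLoop_fix f s0 g hfit]
        have hok := (pvFits_iff f s0 g).mp hfit
        by_cases hlen : f.length ≤ g + s0.length
        · rw [if_pos hlen]
          exact scan_ok f s0 g hok hlen 0 (by omega)
        · rw [if_neg hlen]
          exact scan_short f s0 g hok (by omega) 0 (by omega)
      · have hgl : g < f.length := by
          by_contra hge
          exact hfit (pvFits_of_ge f s0 g (by omega))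
        have hbad : ¬ pvOk f s0 g := fun hok => hfit ((pvFits_iff f s0 g).mpr hok)
        rw [scan_bad f s0 g hbad, bLoop_step f s0 g hfit]
        exact ih (g + 1) (by omega)
  intro g
  exact main (f.length - g) g (by omega)

-- ===== VERDICT (by name: the statement is the Claim_ definition above) =====
theorem alignFastas_spec : Claim_equal_alignFastas := by
  intro fasta s p hdom hpre
  unfold Spec_alignFastas
  obtain ⟨hne, hrest⟩ := hpre
  unfold alignFastas alignFastas_alt
  cases hm : PySem.List.max? (p.map Prod.fst) (fun x => x) with
  | none =>
    exact absurd (List.map_eq_nil_iff.mp ((PySem.List.max?_eq_none_iff _ _).mp hm)) hne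
  | some m =>
    by_cases hlen : fasta.toList.length ≤ s.toList.length
    · rw [if_neg (by omega), if_pos hlen]
    · have hlt : s.toList.length < fasta.toList.length := by omega
      rw [if_pos hlt, if_neg (by omega)]
      have h0 := loop_eq fasta.toList s.toList 0
      rw [show (List.replicate 0 '-' ++ s.toList) = s.toList from by simp] at h0
      have hle : fasta.toList.length ≤ alignBLoop fasta.toList s.toList 0 + s.toList.length := by
        by_contra hc
        rcases hrest with hr | hr
        · omega
        · exact hr (alignBLoop fasta.toList s.toList 0) (by omega)
            ((pvFits_iff _ _ _).mp (bLoop_fits fasta.toList s.toList 0))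
      rw [if_pos hle] at h0
      rw [h0]
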